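-- pv_equiv track=rewrite | github.com/ajoaco18/tecnic | Clases/Clase 5/Arrays_Unidimensionales.py | reemplazar_nombres
-- ===== SOURCE A (Python) =====
-- lista = ["Juan", "María", "Carlos", "Laura", "Pedro"]
--
-- def reemplazar_nombres(lista: list):
--     nombre = "Juan"
--     nombre_remplazo = "Joa"
--     contador_reemplazos = 0
--     for i in range(len(lista)):
--         if lista[i] == nombre:
--             lista[i] = nombre_remplazo
--             contador_reemplazos +=1
--     return contador_reemplazos
-- ===== SOURCE B (Python) =====
-- def reemplazar_nombres(lista: list):
--     # Divide and conquer: recursively split the list in half, rebuild each half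
--     # with replacements and its own count, combine by concatenation and addition,
--     # then commit the rebuilt list to the original object with one slice assignment.
--     def go(seg):
--         if len(seg) == 0:
--             return [], 0
--         if len(seg) == 1:
--             if seg[0] == "Juan":
--                 return ["Joa"], 1
--             return list(seg), 0
--         m = len(seg) // 2
--         izq, ci = go(seg[:m])
--         der, cd = go(seg[m:])
--         return izq + der, ci + cd
--     nuevo, contador = go(lista)
--     lista[:] = nuevo
--     return contador
-- ===== Notes on version B (the rewrite author's own statement) =====
-- stated objective: alternative
-- what changed: A's single iterative index loop that tests, mutates and counts element-by-element is replaced by a divide-and-conquer recursion that splits the list in halves, rebuilds each half with its own count, combines by concatenation and addition, and commits the result with one slice assignment.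
import Mathlib
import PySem

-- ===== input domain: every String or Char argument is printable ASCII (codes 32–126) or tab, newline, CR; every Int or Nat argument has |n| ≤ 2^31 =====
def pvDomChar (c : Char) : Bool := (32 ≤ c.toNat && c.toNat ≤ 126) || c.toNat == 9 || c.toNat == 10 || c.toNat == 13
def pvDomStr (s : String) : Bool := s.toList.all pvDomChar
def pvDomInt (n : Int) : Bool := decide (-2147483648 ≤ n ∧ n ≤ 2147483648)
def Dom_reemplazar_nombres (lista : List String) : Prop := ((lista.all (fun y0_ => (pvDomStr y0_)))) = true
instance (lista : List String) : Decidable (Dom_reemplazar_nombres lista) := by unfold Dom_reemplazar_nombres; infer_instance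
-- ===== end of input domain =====

-- B replaces A's iterative index loop by a divide-and-conquer recursion that splits the list in
-- halves and rebuilds each half with its own count; both Pythons mutate the list identically in place, the
-- equivalence proved is about the return value.

-- ===== PORT A =====
def reemplazar_nombres (lista : List String) : Int :=
  let nombre := "Juan"
  let nombre_remplazo := "Joa"
  let r := (PySem.List.pyRange 0 (lista.length) 1).foldl
    (fun (st : List String × Int) i =>
      if PySem.List.pyGetD st.1 i "" = nombre then
        (PySem.List.pySetD st.1 i nombre_remplazo, st.2 + 1)
      else st)
    (lista, 0)
  r.2

-- ===== PORT B =====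
-- helper 'go' of Source B: divide-and-conquer returning (rebuilt segment, count)
def pvGo (seg : List String) : List String × Int :=
  if seg.length = 0 then ([], 0)
  else if seg.length = 1 then
    (if seg.headD "" = "Juan" then (["Joa"], 1) else (seg, 0))
  else
    let m := seg.length / 2
    let r1 := pvGo (seg.take m)
    let r2 := pvGo (seg.drop m)
    (r1.1 ++ r2.1, r1.2 + r2.2)
termination_by seg.length
decreasing_by
  · simp [List.length_take]; omega
  · simp [List.length_drop]; omega

def reemplazar_nombres_alt (lista : List String) : Int :=
  (pvGo lista).2

-- ===== PRECONDITION & SPEC =====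
def Spec_reemplazar_nombres (lista : List String) (out : Int) : Prop := out = reemplazar_nombres_alt lista
instance (lista : List String) (out : Int) : Decidable (Spec_reemplazar_nombres lista out) := by unfold Spec_reemplazar_nombres; infer_instance

-- ===== CLAIM (what is proved, stated in full; the proofs are below) =====
def Claim_equal_reemplazar_nombres : Prop := ∀ (lista : List String), Dom_reemplazar_nombres lista → Spec_reemplazar_nombres lista (reemplazar_nombres lista)

-- ===== LEMMAS AND PROOFS =====

def pvStep : List String × Int → Int → List String × Int :=
  fun st i =>
    if PySem.List.pyGetD st.1 i "" = "Juan" then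
      (PySem.List.pySetD st.1 i "Joa", st.2 + 1)
    else st

lemma pv_loop_inv (k : Nat) : ∀ (a n : Nat) (lst : List String) (c : Int),
    lst.length = n → n - a = k →
    ((PySem.List.pyRange (a : Int) (n : Int) 1).foldl pvStep (lst, c)).2
      = c + ((lst.drop a).count "Juan" : Int) := by
  induction k with
  | zero =>
    intro a n lst c hlen hk
    have hna : (n : Int) ≤ a := by omega
    rw [PySem.List.pyRange_one_eq_nil hna]
    have : lst.drop a = [] := List.drop_eq_nil_of_le (by omega)
    simp [this]
  | succ k ih =>
    intro a n lst c hlen hk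
    have han : a < n := by omega
    have hlt : (a : Int) < (n : Int) := by exact_mod_cast han
    rw [PySem.List.pyRange_one_cons hlt]
    have hget : PySem.List.pyGetD lst (a : Int) "" = lst[a]'(by omega) := by
      rw [PySem.List.pyGetD_natCast]
      simp [List.getD_eq_getElem?_getD, List.getElem?_eq_getElem (show a < lst.length by omega)]
    have hdrop : lst.drop a = lst[a]'(by omega) :: lst.drop (a + 1) :=
      List.drop_eq_getElem_cons (by omega)
    simp only [List.foldl_cons]
    by_cases hj : lst[a]'(by omega) = "Juan"
    · have hstep : pvStep (lst, c) (a : Int) = (PySem.List.pySetD lst (a : Int) "Joa", c + 1) := by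
        simp [pvStep, hget, hj]
      rw [hstep]
      have hset : PySem.List.pySetD lst (a : Int) "Joa" = lst.set a "Joa" := by
        simp
      have hcast : ((a : Int) + 1) = ((a + 1 : Nat) : Int) := by push_cast; ring
      rw [hset, hcast, ih (a + 1) n (lst.set a "Joa") (c + 1) (by simpa using hlen) (by omega)]
      have hds : (lst.set a "Joa").drop (a + 1) = lst.drop (a + 1) := by
        apply List.ext_getElem
        · simp
        · intro i h1 h2
          simp only [List.getElem_drop]
          rw [List.getElem_set]
          simp only [List.length_set, List.length_drop] at h1
          have : ¬ (a = a + 1 + i) := by omega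
          simp [this]
      rw [hds, hdrop]
      simp [hj]
      ring
    · have hstep : pvStep (lst, c) (a : Int) = (lst, c) := by
        simp [pvStep, hget, hj]
      rw [hstep]
      have hcast : ((a : Int) + 1) = ((a + 1 : Nat) : Int) := by push_cast; ring
      rw [hcast, ih (a + 1) n lst c hlen (by omega)]
      have hne : (lst[a]'(by omega) == "Juan") = false := beq_eq_false_iff_ne.mpr hj
      rw [hdrop, List.count_cons, hne]
      simp

lemma pvGo_snd (seg : List String) : (pvGo seg).2 = (seg.count "Juan" : Int) := by
  induction hn : seg.length using Nat.strong_induction_on generalizing seg with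
  | _ n ih =>
    rw [pvGo]
    by_cases h0 : seg.length = 0
    · simp [List.length_eq_zero_iff.mp h0]
    · by_cases h1 : seg.length = 1
      · obtain ⟨x, hx⟩ := List.length_eq_one_iff.mp h1
        subst hx
        by_cases hj : x = "Juan"
        · simp [hj]
        · simp [hj, List.headD]
      · have h2 : 2 ≤ seg.length := by omega
        simp only [h0, h1, if_false]
        have ht := ih (seg.take (seg.length / 2)).length
          (by simp [List.length_take]; omega) _ rfl
        have hd := ih (seg.drop (seg.length / 2)).length
          (by simp [List.length_drop]; omega) _ rfl
        simp only [ht, hd]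
        have := List.take_append_drop (seg.length / 2) seg
        calc ((seg.take (seg.length / 2)).count "Juan" : Int)
              + ((seg.drop (seg.length / 2)).count "Juan" : Int)
            = (((seg.take (seg.length / 2) ++ seg.drop (seg.length / 2)).count "Juan" : Nat) : Int) := by
              rw [List.count_append]; push_cast; ring
          _ = (seg.count "Juan" : Int) := by rw [this]

-- ===== VERDICT (by name: the statement is the Claim_ definition above) =====
theorem reemplazar_nombres_spec : Claim_equal_reemplazar_nombres := by
  intro lista _
  unfold Spec_reemplazar_nombres reemplazar_nombres reemplazar_nombres_alt
  have h := pv_loop_inv (lista.length - 0) 0 lista.length lista 0 rfl rfl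
  simpa [pvStep, pvGo_snd] using h
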